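-- pv_equiv track=rewrite | github.com/HiMarumo/TP_tester | scripts/run_baseline.py | _find_sample_index_for_object
-- ===== SOURCE A (Python) =====
-- import bisect
--
-- def _find_sample_index_for_object(
--     records: list[dict],
--     stamps: list[int],
--     start_idx: int,
--     target_ns: int,
--     tolerance_ns: int,
--     object_id: int,
-- ) -> int | None:
--     if start_idx >= len(stamps):
--         return None
--     lo = bisect.bisect_left(stamps, target_ns - tolerance_ns, lo=start_idx)
--     hi = bisect.bisect_right(stamps, target_ns + tolerance_ns, lo=lo)
--     best_idx = None
--     best_delta = None
--     for idx in range(lo, hi):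
--         if object_id not in records[idx]["obj_by_id"]:
--             continue
--         delta = abs(stamps[idx] - target_ns)
--         if best_idx is None or delta < best_delta:
--             best_idx = idx
--             best_delta = delta
--     return best_idx
-- ===== SOURCE B (Python) =====
-- import bisect
--
-- def _find_sample_index_for_object(
--     records: list[dict],
--     stamps: list[int],
--     start_idx: int,
--     target_ns: int,
--     tolerance_ns: int,
--     object_id: int,
-- ) -> int | None:
--     # Sort the window's indices by (time distance, index) and return the first
--     # index whose record contains object_id: candidates are visited in
--     # increasing-distance order, so the first hit is the answer (early exit).
--     if start_idx >= len(stamps):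
--         return None
--     lo = bisect.bisect_left(stamps, target_ns - tolerance_ns, lo=start_idx)
--     hi = bisect.bisect_right(stamps, target_ns + tolerance_ns, lo=lo)
--     for idx in sorted(range(lo, hi), key=lambda i: (abs(stamps[i] - target_ns), i)):
--         if object_id in records[idx]["obj_by_id"]:
--             return idx
--     return None
-- ===== Notes on version B (the rewrite author's own statement) =====
-- stated objective: alternative
-- what changed: A's left-to-right window scan with best-index/best-delta accumulators is replaced by sorting the window's indices by (time distance, index) and returning the first index whose record contains object_id (early exit in distance order).
import Mathlib
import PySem

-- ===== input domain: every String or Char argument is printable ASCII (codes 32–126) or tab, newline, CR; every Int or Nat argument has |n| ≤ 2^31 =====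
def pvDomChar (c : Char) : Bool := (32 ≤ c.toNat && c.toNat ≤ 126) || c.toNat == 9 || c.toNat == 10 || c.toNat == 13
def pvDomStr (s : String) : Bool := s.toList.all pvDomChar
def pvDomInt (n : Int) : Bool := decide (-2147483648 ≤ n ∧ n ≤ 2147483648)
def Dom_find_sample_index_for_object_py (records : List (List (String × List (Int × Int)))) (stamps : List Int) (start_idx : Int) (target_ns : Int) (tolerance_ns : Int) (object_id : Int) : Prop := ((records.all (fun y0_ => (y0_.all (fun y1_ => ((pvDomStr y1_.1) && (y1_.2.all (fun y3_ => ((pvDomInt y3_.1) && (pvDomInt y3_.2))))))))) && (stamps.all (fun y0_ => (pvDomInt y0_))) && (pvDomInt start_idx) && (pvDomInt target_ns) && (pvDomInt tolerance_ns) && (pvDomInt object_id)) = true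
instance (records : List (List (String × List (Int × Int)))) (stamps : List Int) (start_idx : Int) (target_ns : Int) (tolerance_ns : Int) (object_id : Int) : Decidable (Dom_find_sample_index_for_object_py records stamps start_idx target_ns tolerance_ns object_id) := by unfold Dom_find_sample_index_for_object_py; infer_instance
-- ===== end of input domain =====

-- B replaces A's accumulator scan of the bisect window by sorting the window's indices by
-- (time distance, index) and returning the first index whose record contains object_id
-- (early exit in distance order); objective: alternative decomposition, not claimed faster.

-- Shared candidate test: Python's `object_id in records[idx]["obj_by_id"]`
-- (dict lookup = first matching key of the association list; membership = key membership).
def pvObjTest (records : List (List (String × List (Int × Int)))) (object_id : Int) (idx : Int) : Bool :=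
  ((((PySem.List.pyGetD records idx []).find? (fun p => p.1 == "obj_by_id")).map Prod.snd).getD []).any
    (fun p => p.1 == object_id)

-- ===== PORT A =====
def find_sample_index_for_object_py (records : List (List (String × List (Int × Int)))) (stamps : List Int) (start_idx : Int) (target_ns : Int) (tolerance_ns : Int) (object_id : Int) : Option Int :=
  if start_idx ≥ (stamps.length : Int) then none
  else
    let lo := PySem.List.bisectLeftLoop stamps (target_ns - tolerance_ns) stamps.length start_idx.toNat stamps.length
    let hi := PySem.List.bisectRightLoop stamps (target_ns + tolerance_ns) stamps.length lo stamps.length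
    let r := (PySem.List.pyRange (lo : Int) (hi : Int)).foldl
      (fun (acc : Option Int × Option Int) idx =>
        if !(pvObjTest records object_id idx) then acc
        else
          match acc with
          | (none, _) => (some idx, some (|PySem.List.pyGetD stamps idx 0 - target_ns|))
          | (some bi, none) => (some bi, none)
          | (some bi, some bd) =>
              if |PySem.List.pyGetD stamps idx 0 - target_ns| < bd then
                (some idx, some (|PySem.List.pyGetD stamps idx 0 - target_ns|))
              else (some bi, some bd))
      (none, none)
    r.1

-- ===== PORT B =====
def find_sample_index_for_object_py_alt (records : List (List (String × List (Int × Int)))) (stamps : List Int) (start_idx : Int) (target_ns : Int) (tolerance_ns : Int) (object_id : Int) : Option Int :=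
  if start_idx ≥ (stamps.length : Int) then none
  else
    let lo := PySem.List.bisectLeftLoop stamps (target_ns - tolerance_ns) stamps.length start_idx.toNat stamps.length
    let hi := PySem.List.bisectRightLoop stamps (target_ns + tolerance_ns) stamps.length lo stamps.length
    (PySem.List.sorted2 (PySem.List.pyRange (lo : Int) (hi : Int))
        (fun i => |PySem.List.pyGetD stamps i 0 - target_ns|) (fun i => i)).find?
      (fun idx => pvObjTest records object_id idx)

-- ===== PRECONDITION & SPEC =====
-- Pre_ excludes exactly the inputs on which the Python A raises: a negative start index
-- reaching bisect (ValueError) and windows containing an index whose record is missing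
-- (IndexError) or lacks the "obj_by_id" key (KeyError); everywhere A returns, Pre_ holds.
def Pre_find_sample_index_for_object_py (records : List (List (String × List (Int × Int)))) (stamps : List Int) (start_idx : Int) (target_ns : Int) (tolerance_ns : Int) (object_id : Int) : Prop :=
  (stamps.length : Int) ≤ start_idx ∨
  (0 ≤ start_idx ∧
    (∀ idx ∈ PySem.List.pyRange
        (PySem.List.bisectLeftLoop stamps (target_ns - tolerance_ns) stamps.length start_idx.toNat stamps.length : Int)
        (PySem.List.bisectRightLoop stamps (target_ns + tolerance_ns) stamps.length
          (PySem.List.bisectLeftLoop stamps (target_ns - tolerance_ns) stamps.length start_idx.toNat stamps.length) stamps.length : Int),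
      idx < (records.length : Int) ∧
      ((PySem.List.pyGetD records idx []).find? (fun p => p.1 == "obj_by_id")).isSome))
instance (records : List (List (String × List (Int × Int)))) (stamps : List Int) (start_idx : Int) (target_ns : Int) (tolerance_ns : Int) (object_id : Int) : Decidable (Pre_find_sample_index_for_object_py records stamps start_idx target_ns tolerance_ns object_id) := by unfold Pre_find_sample_index_for_object_py; infer_instance

def pvWitness_find_sample_index_for_object_py : (List (List (String × List (Int × Int)))) × List Int × Int × Int × Int × Int :=
  ([[("obj_by_id", [(1, 2)])]], [0], 0, 0, 0, 1)

def Spec_find_sample_index_for_object_py (records : List (List (String × List (Int × Int)))) (stamps : List Int) (start_idx : Int) (target_ns : Int) (tolerance_ns : Int) (object_id : Int) (out : Option Int) : Prop := out = find_sample_index_for_object_py_alt records stamps start_idx target_ns tolerance_ns object_id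
instance (records : List (List (String × List (Int × Int)))) (stamps : List Int) (start_idx : Int) (target_ns : Int) (tolerance_ns : Int) (object_id : Int) (out : Option Int) : Decidable (Spec_find_sample_index_for_object_py records stamps start_idx target_ns tolerance_ns object_id out) := by unfold Spec_find_sample_index_for_object_py; infer_instance

-- ===== CLAIM (what is proved, stated in full; the proofs are below) =====
def Claim_equal_find_sample_index_for_object_py : Prop := ∀ (records : List (List (String × List (Int × Int)))) (stamps : List Int) (start_idx : Int) (target_ns : Int) (tolerance_ns : Int) (object_id : Int), Dom_find_sample_index_for_object_py records stamps start_idx target_ns tolerance_ns object_id → Pre_find_sample_index_for_object_py records stamps start_idx target_ns tolerance_ns object_id → Spec_find_sample_index_for_object_py records stamps start_idx target_ns tolerance_ns object_id (find_sample_index_for_object_py records stamps start_idx target_ns tolerance_ns object_id)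

-- ===== LEMMAS AND PROOFS =====

def pvLexLe (k : Int → Int) (a b : Int) : Prop := k a < k b ∨ (k a = k b ∧ a ≤ b)

theorem pvLexLe_refl (k : Int → Int) (a : Int) : pvLexLe k a a := Or.inr ⟨rfl, le_refl a⟩

theorem pvLexLe_trans {k : Int → Int} {a b c : Int} (h₁ : pvLexLe k a b) (h₂ : pvLexLe k b c) :
    pvLexLe k a c := by unfold pvLexLe at *; omega

theorem pvLexLe_antisymm {k : Int → Int} {a b : Int} (h₁ : pvLexLe k a b) (h₂ : pvLexLe k b a) :
    a = b := by unfold pvLexLe at *; omega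

theorem pv_insertBy_pairwise (k : Int → Int) (x : Int) (ys : List Int)
    (h : ys.Pairwise (pvLexLe k)) :
    (PySem.List.insertBy
      (fun a b => decide (k a < k b) || (!decide (k b < k a) && decide (a < b))) x ys).Pairwise
      (pvLexLe k) := by
  induction ys with
  | nil => simp [PySem.List.insertBy]
  | cons y ys ih =>
    rw [List.pairwise_cons] at h
    obtain ⟨hy, hys⟩ := h
    simp only [PySem.List.insertBy]
    split
    · rename_i hc
      simp only [Bool.or_eq_true, Bool.and_eq_true, decide_eq_true_eq, Bool.not_eq_eq_eq_not,
        Bool.not_true, decide_eq_false_iff_not] at hc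
      have hxy : pvLexLe k x y := by unfold pvLexLe; omega
      refine List.pairwise_cons.2 ⟨?_, List.pairwise_cons.2 ⟨hy, hys⟩⟩
      intro z hz
      rcases List.mem_cons.1 hz with rfl | hz
      · exact hxy
      · exact pvLexLe_trans hxy (hy _ hz)
    · rename_i hc
      simp only [Bool.or_eq_true, Bool.and_eq_true, decide_eq_true_eq, Bool.not_eq_eq_eq_not,
        Bool.not_true, decide_eq_false_iff_not] at hc
      have hyx : pvLexLe k y x := by unfold pvLexLe; omega
      refine List.pairwise_cons.2 ⟨?_, ih hys⟩
      intro z hz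
      rw [PySem.List.mem_insertBy] at hz
      rcases hz with rfl | hz
      · exact hyx
      · exact hy _ hz

theorem pv_sorted2_pairwise (k : Int → Int) (L : List Int) :
    (PySem.List.sorted2 L k (fun i => i)).Pairwise (pvLexLe k) := by
  suffices h : ∀ acc : List Int, acc.Pairwise (pvLexLe k) →
      (L.foldl (fun acc x => PySem.List.insertBy
        (fun a b => decide (k a < k b) || (!decide (k b < k a) && decide (a < b))) x acc) acc).Pairwise (pvLexLe k) by
    simpa [PySem.List.sorted2] using h [] (by simp)
  induction L with
  | nil => intro acc h; simpa using h
  | cons x L ih =>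
    intro acc h
    exact ih _ (pv_insertBy_pairwise k x acc h)

theorem pv_find?_sorted {k : Int → Int} {P : Int → Bool} {S : List Int} {m : Int}
    (hp : S.Pairwise (pvLexLe k)) (hf : S.find? P = some m) :
    m ∈ S ∧ P m = true ∧ ∀ y ∈ S, P y = true → pvLexLe k m y := by
  rw [List.find?_eq_some_iff_append] at hf
  obtain ⟨hPm, as, bs, rfl, has⟩ := hf
  refine ⟨by simp, hPm, ?_⟩
  intro y hy hPy
  rcases List.mem_append.1 hy with hy | hy
  · exact absurd hPy (by simpa using has y hy)
  · rcases List.mem_cons.1 hy with rfl | hy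
    · exact pvLexLe_refl k y
    · have := (List.pairwise_append.1 hp).2.1
      exact (List.pairwise_cons.1 this).1 y hy

theorem pv_foldA_some (k : Int → Int) (P : Int → Bool) :
    ∀ (L : List Int) (b : Int), L.Pairwise (· < ·) → (∀ y ∈ L, b < y) →
    ∃ m, L.foldl
        (fun (acc : Option Int × Option Int) idx =>
          if !(P idx) then acc
          else
            match acc with
            | (none, _) => (some idx, some (k idx))
            | (some bi, none) => (some bi, none)
            | (some bi, some bd) =>
                if k idx < bd then (some idx, some (k idx)) else (some bi, some bd))
        (some b, some (k b)) = (some m, some (k m)) ∧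
      (m = b ∨ (m ∈ L ∧ P m = true)) ∧ pvLexLe k m b ∧
      (∀ y ∈ L, P y = true → pvLexLe k m y) := by
  intro L
  induction L with
  | nil =>
    intro b _ _
    exact ⟨b, rfl, Or.inl rfl, pvLexLe_refl k b, by simp⟩
  | cons x L ih =>
    intro b hL hb
    rw [List.pairwise_cons] at hL
    obtain ⟨hx, hL⟩ := hL
    have hbx : b < x := hb x (List.mem_cons_self)
    by_cases hP : P x = true
    · simp only [List.foldl_cons, hP, Bool.not_true, if_neg Bool.false_ne_true]
      by_cases hlt : k x < k b
      · -- accumulator becomes x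
        rw [if_pos hlt]
        obtain ⟨m, heq, hmem, hmb, hall⟩ := ih x hL hx
        refine ⟨m, heq, ?_, ?_, ?_⟩
        · rcases hmem with rfl | ⟨h1, h2⟩
          · exact Or.inr ⟨List.mem_cons_self, hP⟩
          · exact Or.inr ⟨List.mem_cons_of_mem _ h1, h2⟩
        · exact pvLexLe_trans hmb (Or.inl hlt)
        · intro y hy hPy
          rcases List.mem_cons.1 hy with rfl | hy
          · exact hmb
          · exact hall y hy hPy
      · rw [if_neg hlt]
        obtain ⟨m, heq, hmem, hmb, hall⟩ := ih b hL (fun y hy => hb y (List.mem_cons_of_mem _ hy))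
        refine ⟨m, heq, ?_, hmb, ?_⟩
        · rcases hmem with rfl | ⟨h1, h2⟩
          · exact Or.inl rfl
          · exact Or.inr ⟨List.mem_cons_of_mem _ h1, h2⟩
        · intro y hy hPy
          rcases List.mem_cons.1 hy with rfl | hy
          · exact pvLexLe_trans hmb (by unfold pvLexLe; omega)
          · exact hall y hy hPy
    · simp only [List.foldl_cons, hP]
      simp only [Bool.not_eq_true] at hP
      rw [if_pos (by simp)]
      obtain ⟨m, heq, hmem, hmb, hall⟩ := ih b hL (fun y hy => hb y (List.mem_cons_of_mem _ hy))
      refine ⟨m, heq, ?_, hmb, ?_⟩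
      · rcases hmem with rfl | ⟨h1, h2⟩
        · exact Or.inl rfl
        · exact Or.inr ⟨List.mem_cons_of_mem _ h1, h2⟩
      · intro y hy hPy
        rcases List.mem_cons.1 hy with rfl | hy
        · rw [hPy] at hP; cases hP
        · exact hall y hy hPy

theorem pv_foldA_char (k : Int → Int) (P : Int → Bool) :
    ∀ (L : List Int), L.Pairwise (· < ·) →
    ((∀ y ∈ L, P y = false) ∧ (L.foldl
        (fun (acc : Option Int × Option Int) idx =>
          if !(P idx) then acc
          else
            match acc with
            | (none, _) => (some idx, some (k idx))
            | (some bi, none) => (some bi, none)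
            | (some bi, some bd) =>
                if k idx < bd then (some idx, some (k idx)) else (some bi, some bd))
        (none, none)).1 = none) ∨
    (∃ m, (L.foldl
        (fun (acc : Option Int × Option Int) idx =>
          if !(P idx) then acc
          else
            match acc with
            | (none, _) => (some idx, some (k idx))
            | (some bi, none) => (some bi, none)
            | (some bi, some bd) =>
                if k idx < bd then (some idx, some (k idx)) else (some bi, some bd))
        (none, none)).1 = some m ∧ m ∈ L ∧ P m = true ∧
      (∀ y ∈ L, P y = true → pvLexLe k m y)) := by
  intro L
  induction L with
  | nil => exact fun _ => Or.inl ⟨by simp, rfl⟩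
  | cons x L ih =>
    intro hL
    rw [List.pairwise_cons] at hL
    obtain ⟨hx, hL'⟩ := hL
    by_cases hP : P x = true
    · right
      simp only [List.foldl_cons, hP, Bool.not_true, if_neg Bool.false_ne_true]
      obtain ⟨m, heq, hmem, hmb, hall⟩ := pv_foldA_some k P L x hL' hx
      refine ⟨m, by rw [heq], ?_, ?_, ?_⟩
      · rcases hmem with rfl | ⟨h1, _⟩
        · exact List.mem_cons_self
        · exact List.mem_cons_of_mem _ h1
      · rcases hmem with rfl | ⟨_, h2⟩
        · exact hP
        · exact h2
      · intro y hy hPy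
        rcases List.mem_cons.1 hy with rfl | hy
        · exact hmb
        · exact hall y hy hPy
    · simp only [Bool.not_eq_true] at hP
      simp only [List.foldl_cons, hP, Bool.not_false]
      rcases ih hL' with ⟨h1, h2⟩ | ⟨m, heq, hmem, hPm, hall⟩
      · left
        refine ⟨?_, h2⟩
        intro y hy
        rcases List.mem_cons.1 hy with rfl | hy
        · exact hP
        · exact h1 y hy
      · right
        refine ⟨m, heq, List.mem_cons_of_mem _ hmem, hPm, ?_⟩
        intro y hy hPy
        rcases List.mem_cons.1 hy with rfl | hy
        · rw [hPy] at hP; cases hP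
        · exact hall y hy hPy

theorem pv_core (k : Int → Int) (P : Int → Bool) (L : List Int) (hL : L.Pairwise (· < ·)) :
    (L.foldl
        (fun (acc : Option Int × Option Int) idx =>
          if !(P idx) then acc
          else
            match acc with
            | (none, _) => (some idx, some (k idx))
            | (some bi, none) => (some bi, none)
            | (some bi, some bd) =>
                if k idx < bd then (some idx, some (k idx)) else (some bi, some bd))
        (none, none)).1 =
      (PySem.List.sorted2 L k (fun i => i)).find? P := by
  have hperm : (PySem.List.sorted2 L k (fun i => i)).Perm L := PySem.List.sorted2_perm L k _ false
  have hpair := pv_sorted2_pairwise k L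
  rcases pv_foldA_char k P L hL with ⟨h1, h2⟩ | ⟨m, heq, hmem, hPm, hall⟩
  · rw [h2]
    symm
    rw [List.find?_eq_none]
    intro y hy
    simp [h1 y (hperm.mem_iff.1 hy)]
  · rw [heq]
    cases hfind : (PySem.List.sorted2 L k (fun i => i)).find? P with
    | none =>
      rw [List.find?_eq_none] at hfind
      exact absurd hPm (by simpa using hfind m (hperm.mem_iff.2 hmem))
    | some m' =>
      obtain ⟨hm'S, hPm', hall'⟩ := pv_find?_sorted hpair hfind
      have h1 : pvLexLe k m m' := hall m' (hperm.mem_iff.1 hm'S) hPm'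
      have h2 : pvLexLe k m' m := hall' m (hperm.mem_iff.2 hmem) hPm
      rw [pvLexLe_antisymm h1 h2]

-- ===== VERDICT (by name: the statement is the Claim_ definition above) =====
theorem find_sample_index_for_object_py_spec : Claim_equal_find_sample_index_for_object_py := by
  intro records stamps start_idx target_ns tolerance_ns object_id _ _
  unfold Spec_find_sample_index_for_object_py
  unfold find_sample_index_for_object_py find_sample_index_for_object_py_alt
  by_cases h : start_idx ≥ (stamps.length : Int)
  · rw [if_pos h, if_pos h]
  · rw [if_neg h, if_neg h]
    exact pv_core (fun i => |PySem.List.pyGetD stamps i 0 - target_ns|)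
      (fun idx => pvObjTest records object_id idx) _
      (PySem.List.pairwise_lt_pyRange_one _ _)
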